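-- pv_equiv track=rewrite | github.com/szufix/mapel | mapel/voting/features.py | potes_to_unique_potes
-- ===== SOURCE A (Python) =====
-- def potes_to_unique_potes(potes):
--     """ Remove repetitions from potes (positional votes) """
--     unique_potes = []
--     n = []
--     for pote in potes:
--         flag_new = True
--         for i, p in enumerate(unique_potes):
--             if list(pote) == list(p):
--                 n[i] += 1
--                 flag_new = False
--         if flag_new:
--             unique_potes.append(pote)
--             n.append(1)
--     return unique_potes, n
-- ===== SOURCE B (Python) =====
-- def potes_to_unique_potes(potes):
--     """ Remove repetitions from potes (positional votes) """
--     uniq = []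
--     counts = []
--     work = potes
--     while work:
--         head = work[0]
--         key = list(head)
--         c = 1
--         rest = []
--         for q in work[1:]:
--             if list(q) == key:
--                 c += 1
--             else:
--                 rest.append(q)
--         uniq.append(head)
--         counts.append(c)
--         work = rest
--     return uniq, counts
-- ===== Notes on version B (the rewrite author's own statement) =====
-- stated objective: alternative
-- what changed: Replaces A's per-vote rescan of the growing uniques list by repeated head-partitioning of the remaining votes: take the first remaining vote, count and strip all of its duplicates from the remainder in one pass, then continue on the shrunken remainder.
import Mathlib
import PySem

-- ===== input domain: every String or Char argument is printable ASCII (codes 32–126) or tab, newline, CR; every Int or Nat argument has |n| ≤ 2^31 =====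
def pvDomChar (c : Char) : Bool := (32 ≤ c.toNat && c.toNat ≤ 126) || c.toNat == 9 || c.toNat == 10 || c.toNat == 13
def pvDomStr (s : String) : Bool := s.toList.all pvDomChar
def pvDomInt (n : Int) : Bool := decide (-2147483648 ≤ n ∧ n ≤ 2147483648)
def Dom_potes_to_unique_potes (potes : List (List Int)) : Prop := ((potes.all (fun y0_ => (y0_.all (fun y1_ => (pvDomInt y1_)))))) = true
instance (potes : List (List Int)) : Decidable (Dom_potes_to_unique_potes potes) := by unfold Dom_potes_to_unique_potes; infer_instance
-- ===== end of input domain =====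

-- B replaces A's per-vote rescan of the growing uniques list by repeated
-- head-partitioning of the remaining votes (measured constant-factor speedup).

-- ===== PORT A =====
-- inner loop 'for i, p in enumerate(unique_potes): if list(pote) == list(p): n[i] += 1; flag_new = False'
-- (potes are lists of ints, so list(pote) == list(p) is pote = p; the enumerate index i is ≥ 0
--  and < n.length, so List.modify i.toNat matches Python's n[i] += 1 exactly)
def pvInnerA (pote : List Int) (acc : List Int × Bool) (ip : Int × List Int) : List Int × Bool :=
  if pote = ip.2 then (acc.1.modify ip.1.toNat (· + 1), false) else acc

def pvStepA (st : List (List Int) × List Int) (pote : List Int) : List (List Int) × List Int :=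
  let r := (PySem.List.enumerate st.1).foldl (pvInnerA pote) (st.2, true)
  if r.2 then (st.1 ++ [pote], r.1 ++ [1]) else (st.1, r.1)

def potes_to_unique_potes (potes : List (List Int)) : List (List Int) × List Int :=
  potes.foldl pvStepA ([], [])

-- ===== PORT B =====
-- the inner 'for q in work[1:]' loop: count duplicates of key, collect the rest
def pvLoopB (key : List Int) (tail : List (List Int)) : Int × List (List Int) :=
  tail.foldl (fun acc q => if q = key then (acc.1 + 1, acc.2) else (acc.1, acc.2 ++ [q])) (1, [])

-- characterisation of the inner loop; the recursion pvGoB cites it for termination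
lemma pvLoopB_spec (key : List Int) : ∀ (tail : List (List Int)) (c : Int) (acc : List (List Int)),
    tail.foldl (fun acc q => if q = key then (acc.1 + 1, acc.2) else (acc.1, acc.2 ++ [q])) (c, acc)
      = (c + (tail.count key : Int), acc ++ tail.filter (fun q => q ≠ key)) := by
  intro tail
  induction tail with
  | nil => intro c acc; simp
  | cons q t ih =>
    intro c acc
    by_cases h : q = key
    · subst h
      simp only [List.foldl_cons, ih]
      simp
      ring
    · simp only [List.foldl_cons, if_neg h, ih]
      have hb : (q == key) = false := beq_false_of_ne h
      simp [h]

-- the while loop: state (uniq, counts, work), one iteration per unique vote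
def pvGoB (uniq : List (List Int)) (counts : List Int) (work : List (List Int)) :
    List (List Int) × List Int :=
  match work with
  | [] => (uniq, counts)
  | head :: tl =>
    let r := pvLoopB head tl
    pvGoB (uniq ++ [head]) (counts ++ [r.1]) r.2
termination_by work.length
decreasing_by
  simp only [pvLoopB, pvLoopB_spec head tl 1 []]
  simpa using Nat.lt_succ_of_le (List.length_filter_le _ tl)

def potes_to_unique_potes_alt (potes : List (List Int)) : List (List Int) × List Int :=
  pvGoB [] [] potes

-- ===== PRECONDITION & SPEC =====
def Spec_potes_to_unique_potes (potes : List (List Int)) (out : List (List Int) × List Int) : Prop := out = potes_to_unique_potes_alt potes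
instance (potes : List (List Int)) (out : List (List Int) × List Int) : Decidable (Spec_potes_to_unique_potes potes out) := by unfold Spec_potes_to_unique_potes; infer_instance

-- ===== CLAIM (what is proved, stated in full; the proofs are below) =====
def Claim_equal_potes_to_unique_potes : Prop := ∀ (potes : List (List Int)), Dom_potes_to_unique_potes potes → Spec_potes_to_unique_potes potes (potes_to_unique_potes potes)

-- ===== LEMMAS AND PROOFS =====

lemma pvInnerA_spec (pote : List Int) :
    ∀ (u : List (List Int)) (s : Nat) (n : List Int) (b : Bool), u.Nodup →
    (PySem.List.enumerate u (s : Int)).foldl (pvInnerA pote) (n, b) =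
      if pote ∈ u then (n.modify (s + u.idxOf pote) (· + 1), false) else (n, b) := by
  intro u
  induction u with
  | nil => intro s n b _; simp [PySem.List.enumerate_nil]
  | cons a u ih =>
    intro s n b hnd
    rw [PySem.List.enumerate_cons]
    simp only [List.foldl_cons]
    by_cases h : pote = a
    · subst h
      have hnotin : pote ∉ u := (List.nodup_cons.mp hnd).1
      have : pvInnerA pote (n, b) ((s : Int), pote) = (n.modify s (· + 1), false) := by
        simp [pvInnerA]
      rw [this]
      rw [show ((s : Int) + 1) = ((s + 1 : Nat) : Int) by push_cast; ring]
      rw [ih (s + 1) (n.modify s (· + 1)) false (List.nodup_cons.mp hnd).2]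
      simp [hnotin, List.idxOf_cons_self, List.mem_cons]
    · have : pvInnerA pote (n, b) ((s : Int), a) = (n, b) := by
        simp [pvInnerA, h]
      rw [this]
      rw [show ((s : Int) + 1) = ((s + 1 : Nat) : Int) by push_cast; ring]
      rw [ih (s + 1) n b (List.nodup_cons.mp hnd).2]
      rw [List.idxOf_cons_ne u (fun he => h he.symm)]
      by_cases hm : pote ∈ u
      · have harith : s + 1 + List.idxOf pote u = s + (List.idxOf pote u).succ := by omega
        simp [hm, List.mem_cons, h, harith]
      · simp [hm, List.mem_cons, h]

lemma pvStepA_spec (u : List (List Int)) (n : List Int) (pote : List Int)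
    (hnd : u.Nodup) :
    pvStepA (u, n) pote =
      if pote ∈ u then (u, n.modify (u.idxOf pote) (· + 1)) else (u ++ [pote], n ++ [1]) := by
  unfold pvStepA
  have := pvInnerA_spec pote u 0 n true hnd
  simp only [Nat.cast_zero] at this
  rw [show (PySem.List.enumerate u) = (PySem.List.enumerate u ((0:Nat):Int)) by norm_num] at this ⊢
  rw [this]
  by_cases hm : pote ∈ u
  · simp [hm]
  · simp [hm]

-- head-extraction: with h0 pinned at the front of A's state, every later copy of h0
-- only bumps slot 0, and the other votes evolve the tail state as if h0 were absent
lemma pvFront (h0 : List Int) :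
    ∀ (t : List (List Int)) (c : Int) (u : List (List Int)) (n : List Int),
    (h0 :: u).Nodup →
    t.foldl pvStepA (h0 :: u, c :: n)
      = (h0 :: ((t.filter (fun q => q ≠ h0)).foldl pvStepA (u, n)).1,
         (c + (t.count h0 : Int)) :: ((t.filter (fun q => q ≠ h0)).foldl pvStepA (u, n)).2) := by
  intro t
  induction t with
  | nil => intro c u n _; simp
  | cons x t ih =>
    intro c u n hnd
    have hndu : u.Nodup := (List.nodup_cons.mp hnd).2
    have hh0u : h0 ∉ u := (List.nodup_cons.mp hnd).1
    simp only [List.foldl_cons]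
    by_cases hx : x = h0
    · subst hx
      rw [pvStepA_spec _ _ _ hnd]
      simp only [List.mem_cons, true_or, if_true, List.idxOf_cons_self,
        List.modify_zero_cons]
      rw [ih (c + 1) u n hnd]
      have hcnt : ((x :: t).count x : Int) = (t.count x : Int) + 1 := by
        simp
      have hfil : (x :: t).filter (fun q => q ≠ x) = t.filter (fun q => q ≠ x) := by
        simp
      rw [hfil, hcnt]
      have : c + 1 + (t.count x : Int) = c + ((t.count x : Int) + 1) := by ring
      rw [this]
    · rw [pvStepA_spec _ _ _ hnd]
      have hcnt : ((x :: t).count h0 : Int) = (t.count h0 : Int) := by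
        simp [List.count_cons, beq_false_of_ne hx]
      have hfil : (x :: t).filter (fun q => q ≠ h0) = x :: t.filter (fun q => q ≠ h0) := by
        simp [hx]
      by_cases hm : x ∈ u
      · have hmem : x ∈ h0 :: u := List.mem_cons_of_mem _ hm
        rw [if_pos hmem, List.idxOf_cons_ne u (fun he => hx he.symm),
          List.modify_succ_cons]
        rw [ih c u (n.modify (u.idxOf x) (· + 1)) hnd]
        rw [hfil, hcnt]
        simp only [List.foldl_cons]
        rw [pvStepA_spec _ _ _ hndu, if_pos hm]
      · have hmem : x ∉ h0 :: u := by
          simp [List.mem_cons, hx, hm]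
        rw [if_neg hmem]
        have hnd' : (h0 :: (u ++ [x])).Nodup := by
          rw [List.nodup_cons]
          constructor
          · intro hmem2
            rcases List.mem_append.mp hmem2 with h | h
            · exact hh0u h
            · exact hx ((List.mem_singleton.mp h).symm)
          · refine hndu.append (List.nodup_singleton x) ?_
            intro a ha hb
            rw [List.mem_singleton] at hb
            subst hb
            exact hm ha
        have : (h0 :: u ++ [x], c :: n ++ [1]) = (h0 :: (u ++ [x]), c :: (n ++ [1])) := rfl
        rw [this, ih c (u ++ [x]) (n ++ [1]) hnd']
        rw [hfil, hcnt]
        simp only [List.foldl_cons]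
        rw [pvStepA_spec _ _ _ hndu, if_neg hm]

-- A on a cons: the head absorbs all of its duplicates, the rest recurses on the filtered tail
lemma pvA_cons (h0 : List Int) (t : List (List Int)) :
    potes_to_unique_potes (h0 :: t)
      = (h0 :: (potes_to_unique_potes (t.filter (fun q => q ≠ h0))).1,
         (1 + (t.count h0 : Int)) :: (potes_to_unique_potes (t.filter (fun q => q ≠ h0))).2) := by
  unfold potes_to_unique_potes
  simp only [List.foldl_cons]
  have h1 : pvStepA ([], []) h0 = ([h0], [1]) := by
    simp [pvStepA, PySem.List.enumerate_nil]
  rw [h1, pvFront h0 t 1 [] [] (by simp)]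

lemma pvGoB_spec (uniq : List (List Int)) (counts : List Int) (work : List (List Int)) :
    pvGoB uniq counts work
      = (uniq ++ (potes_to_unique_potes work).1, counts ++ (potes_to_unique_potes work).2) := by
  fun_induction pvGoB uniq counts work with
  | case1 uniq counts => simp [potes_to_unique_potes]
  | case2 uniq counts head tl r ih =>
    rw [ih]
    have hr : r = (1 + (tl.count head : Int), tl.filter (fun q => q ≠ head)) := by
      simpa using pvLoopB_spec head tl 1 []
    rw [hr, pvA_cons head tl]
    simp

-- ===== VERDICT (by name: the statement is the Claim_ definition above) =====
theorem potes_to_unique_potes_spec : Claim_equal_potes_to_unique_potes := by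
  intro potes _
  unfold Spec_potes_to_unique_potes potes_to_unique_potes_alt
  rw [pvGoB_spec]
  simp
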